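-- pv_equiv track=rewrite | github.com/dtrongjet790627/WorkOrderHelper | utils/log_parser.py | deduplicate_error_logs
-- ===== SOURCE A (Python) =====
-- def deduplicate_error_logs(logs):
--     """去重连续相同的失败日志
--
--     相同工单+相同批次+相同错误信息的连续失败只保留第一条
--
--     Args:
--         logs: 日志列表
--
--     Returns:
--         list: 去重后的日志列表
--     """
--     if not logs:
--         return logs
--
--     result = []
--     seen_errors = {}
--
--     for log in logs:
--         if log.get('status') == 'success' or log.get('level') == 'SUCCESS':
--             key_prefix = (log.get('wono'), log.get('batch'))
--             keys_to_remove = [k for k in seen_errors if k[:2] == key_prefix]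
--             for k in keys_to_remove:
--                 del seen_errors[k]
--             result.append(log)
--         elif log.get('status') == 'failed' or log.get('level') == 'ERROR':
--             key = (log.get('wono'), log.get('batch'), log.get('error_msg') or log.get('raw'))
--             if key not in seen_errors:
--                 seen_errors[key] = log.get('time')
--                 result.append(log)
--         else:
--             result.append(log)
--
--     return result
-- ===== SOURCE B (Python) =====
-- def deduplicate_error_logs(logs):
--     """Stateless re-implementation: a failed log is a duplicate iff, scanning
--     backwards through earlier logs of the same (wono, batch) group, a failed
--     log with the same error key appears before any success of that group."""
--
--     def is_success(log):
--         return log.get('status') == 'success' or log.get('level') == 'SUCCESS'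
--
--     def is_failed(log):
--         return log.get('status') == 'failed' or log.get('level') == 'ERROR'
--
--     result = []
--     for i, log in enumerate(logs):
--         if is_success(log) or not is_failed(log):
--             result.append(log)
--             continue
--         g = (log.get('wono'), log.get('batch'))
--         key = log.get('error_msg') or log.get('raw')
--         duplicate = False
--         for j in range(i - 1, -1, -1):
--             prev = logs[j]
--             if (prev.get('wono'), prev.get('batch')) != g:
--                 continue
--             if is_success(prev):
--                 break
--             if is_failed(prev) and (prev.get('error_msg') or prev.get('raw')) == key:
--                 duplicate = True
--                 break
--         if not duplicate:
--             result.append(log)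
--     return result
-- ===== Notes on version B (the rewrite author's own statement) =====
-- stated objective: alternative
-- what changed: Replaces A's single stateful pass (a seen_errors dict keyed by (wono,batch,error) that is scanned and cleared on every success) with a stateless formulation: each failed log decides duplicate-hood by scanning backwards through earlier logs of its own (wono,batch) group, stopping at the nearest success of that group; no dict or mutable state is kept.
import Mathlib
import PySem

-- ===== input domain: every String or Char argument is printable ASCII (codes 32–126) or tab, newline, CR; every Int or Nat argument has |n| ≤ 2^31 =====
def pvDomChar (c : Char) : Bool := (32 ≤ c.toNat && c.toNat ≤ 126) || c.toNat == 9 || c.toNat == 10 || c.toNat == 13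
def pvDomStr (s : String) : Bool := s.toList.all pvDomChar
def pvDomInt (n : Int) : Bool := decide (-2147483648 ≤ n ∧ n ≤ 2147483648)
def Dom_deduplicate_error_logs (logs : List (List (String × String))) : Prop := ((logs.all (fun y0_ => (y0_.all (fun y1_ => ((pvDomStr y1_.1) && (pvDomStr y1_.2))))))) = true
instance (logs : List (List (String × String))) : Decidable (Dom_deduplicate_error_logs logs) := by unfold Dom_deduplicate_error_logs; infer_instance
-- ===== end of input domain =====

-- B replaces A's single pass with a mutating key dict (cleared by a key scan on each
-- success) by a stateless per-log backward scan through earlier logs of the same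
-- (wono, batch) group — alternative decomposition, not claimed faster.

-- shared helper: Python's log.get(k) on the dict `log` (assoc list, first match)
def pvGet (log : List (String × String)) (k : String) : Option String :=
  (PySem.Dict.mk log).get? k

-- shared helper: Python's `a or b` on two Optional[str] values ('' and None are falsy)
def pvOrOpt (a b : Option String) : Option String :=
  match a with
  | some s => if s = "" then b else some s
  | none => b

-- ===== PORT A =====
-- A's loop state: (result, seen_errors); seen_errors maps (wono, batch, error key) to time
def pvAStep (st : List (List (String × String)) × PySem.Dict (Option String × Option String × Option String) (Option String))
    (log : List (String × String)) :
    List (List (String × String)) × PySem.Dict (Option String × Option String × Option String) (Option String) :=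
  if pvGet log "status" = some "success" ∨ pvGet log "level" = some "SUCCESS" then
    let kp := (pvGet log "wono", pvGet log "batch")
    -- k[:2] on a 3-tuple key is its first two components (k.1, k.2.1)
    let ktr := st.2.keys.filter (fun k => decide ((k.1, k.2.1) = kp))
    (st.1 ++ [log], ktr.foldl (fun d k => d.erase k) st.2)
  else if pvGet log "status" = some "failed" ∨ pvGet log "level" = some "ERROR" then
    let key := (pvGet log "wono", pvGet log "batch", pvOrOpt (pvGet log "error_msg") (pvGet log "raw"))
    if (st.2.get? key).isSome then (st.1, st.2)
    else (st.1 ++ [log], st.2.insert key (pvGet log "time"))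
  else
    (st.1 ++ [log], st.2)

def deduplicate_error_logs (logs : List (List (String × String))) : List (List (String × String)) :=
  if logs = [] then logs
  else (logs.foldl pvAStep ([], PySem.Dict.mk [])).1

-- ===== PORT B =====
def pvIsSuccess (log : List (String × String)) : Bool :=
  decide (pvGet log "status" = some "success") || decide (pvGet log "level" = some "SUCCESS")

def pvIsFailed (log : List (String × String)) : Bool :=
  decide (pvGet log "status" = some "failed") || decide (pvGet log "level" = some "ERROR")

-- B's inner backward scan `for j in range(i-1, -1, -1)`: revpre is reversed(logs[:i])
def pvScanDup (g : Option String × Option String) (key : Option String) :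
    List (List (String × String)) → Bool
  | [] => false
  | prev :: rest =>
    if (pvGet prev "wono", pvGet prev "batch") ≠ g then pvScanDup g key rest
    else if pvIsSuccess prev then false
    else if pvIsFailed prev && decide (pvOrOpt (pvGet prev "error_msg") (pvGet prev "raw") = key) then true
    else pvScanDup g key rest

-- B's outer loop over `enumerate(logs)`, carrying the reversed prefix instead of the index i
def pvDedupGo (revpre : List (List (String × String))) :
    List (List (String × String)) → List (List (String × String))
  | [] => []
  | log :: rest =>
    if pvIsSuccess log || !pvIsFailed log then log :: pvDedupGo (log :: revpre) rest
    else if pvScanDup (pvGet log "wono", pvGet log "batch")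
              (pvOrOpt (pvGet log "error_msg") (pvGet log "raw")) revpre then
      pvDedupGo (log :: revpre) rest
    else log :: pvDedupGo (log :: revpre) rest

def deduplicate_error_logs_alt (logs : List (List (String × String))) : List (List (String × String)) :=
  pvDedupGo [] logs

-- ===== PRECONDITION & SPEC =====
def Spec_deduplicate_error_logs (logs : List (List (String × String))) (out : List (List (String × String))) : Prop := out = deduplicate_error_logs_alt logs
instance (logs : List (List (String × String))) (out : List (List (String × String))) : Decidable (Spec_deduplicate_error_logs logs out) := by unfold Spec_deduplicate_error_logs; infer_instance

-- ===== CLAIM (what is proved, stated in full; the proofs are below) =====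
def Claim_equal_deduplicate_error_logs : Prop := ∀ (logs : List (List (String × String))), Dom_deduplicate_error_logs logs → Spec_deduplicate_error_logs logs (deduplicate_error_logs logs)

-- ===== LEMMAS AND PROOFS =====

theorem pv_get?_erase {κ ν : Type} [BEq κ] [LawfulBEq κ] [DecidableEq κ]
    (d : PySem.Dict κ ν) (k x : κ) :
    (d.erase k).get? x = if x = k then none else d.get? x := by
  obtain ⟨items⟩ := d
  induction items with
  | nil => simp [PySem.Dict.erase, PySem.Dict.get?]
  | cons p rest ih =>
    simp only [PySem.Dict.erase, PySem.Dict.get?, List.filter_cons] at *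
    by_cases hpk : p.1 = k
    · have hpx : (p.1 == x) = (k == x) := by rw [hpk]
      by_cases hxk : x = k
      · simp_all
      · have hkx : (k == x) = false := by
          simp only [beq_eq_false_iff_ne]; exact fun h => hxk h.symm
        simp_all
    · by_cases hpx : p.1 = x
      · by_cases hxk : x = k <;> simp_all
      · simp_all

theorem pv_get?_foldl_erase {κ ν : Type} [BEq κ] [LawfulBEq κ] [DecidableEq κ]
    (ks : List κ) (d : PySem.Dict κ ν) (x : κ) :
    ((ks.foldl (fun d k => d.erase k) d).get? x) = if x ∈ ks then none else d.get? x := by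
  induction ks generalizing d with
  | nil => simp
  | cons k ks ih =>
    simp only [List.foldl_cons, ih, pv_get?_erase, List.mem_cons]
    by_cases h1 : x ∈ ks <;> by_cases h2 : x = k <;> simp [h1, h2]

-- the invariant: key (g, e) is in A's seen_errors iff B's backward scan over the
-- reversed processed prefix reports a duplicate
def pvInv (seen : PySem.Dict (Option String × Option String × Option String) (Option String))
    (revpre : List (List (String × String))) : Prop :=
  ∀ g e, (seen.get? (g.1, g.2, e)).isSome = pvScanDup g e revpre

theorem pvInv_step (seen : PySem.Dict (Option String × Option String × Option String) (Option String))
    (revpre : List (List (String × String))) (log : List (String × String))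
    (hinv : pvInv seen revpre) :
    pvInv (pvAStep (res, seen) log).2 (log :: revpre) ∧
      (pvAStep (res, seen) log).1 =
        res ++ (if pvIsSuccess log || !pvIsFailed log then [log]
                else if pvScanDup (pvGet log "wono", pvGet log "batch")
                        (pvOrOpt (pvGet log "error_msg") (pvGet log "raw")) revpre then []
                else [log]) := by
  by_cases hs : pvGet log "status" = some "success" ∨ pvGet log "level" = some "SUCCESS"
  · have hsb : pvIsSuccess log = true := by
      simp [pvIsSuccess]; tauto
    refine ⟨?_, by simp [pvAStep, if_pos hs, hsb]⟩
    intro g e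
    simp only [pvAStep, if_pos hs]
    rw [pv_get?_foldl_erase]
    simp only [List.mem_filter, decide_eq_true_eq, pvScanDup, hsb]
    by_cases hg : (pvGet log "wono", pvGet log "batch") = g
    · subst hg
      by_cases hmem : ((pvGet log "wono", pvGet log "batch", e) :
          Option String × Option String × Option String) ∈ seen.keys
      · simp [hmem]
      · have h0 : seen.get? (pvGet log "wono", pvGet log "batch", e) = none :=
          (PySem.Dict.get?_eq_none_iff_not_mem_keys seen _).2 hmem
        simp [hmem, h0]
    · have hg' : ¬(g.1 = pvGet log "wono" ∧ g.2 = pvGet log "batch") := by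
        rintro ⟨h1, h2⟩; exact hg (Prod.ext h1.symm h2.symm)
      have hgor : ¬pvGet log "wono" = g.1 ∨ ¬pvGet log "batch" = g.2 := by
        by_contra hc; push_neg at hc; exact hg (Prod.ext hc.1 hc.2)
      simp [Prod.ext_iff, Ne.symm hg, hinv g e]
      tauto
  · by_cases hf : pvGet log "status" = some "failed" ∨ pvGet log "level" = some "ERROR"
    · have hsb : pvIsSuccess log = false := by
        simp [pvIsSuccess]; tauto
      have hfb : pvIsFailed log = true := by
        simp [pvIsFailed]; tauto
      have hscan : pvScanDup (pvGet log "wono", pvGet log "batch")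
          (pvOrOpt (pvGet log "error_msg") (pvGet log "raw")) revpre =
          (seen.get? (pvGet log "wono", pvGet log "batch",
            pvOrOpt (pvGet log "error_msg") (pvGet log "raw"))).isSome :=
        (hinv (pvGet log "wono", pvGet log "batch") _).symm
      by_cases hmem : (seen.get? (pvGet log "wono", pvGet log "batch",
          pvOrOpt (pvGet log "error_msg") (pvGet log "raw"))).isSome
      · refine ⟨?_, by simp [pvAStep, if_neg hs, if_pos hf, hmem, hsb, hfb, hscan]⟩
        intro g e
        simp only [pvAStep, if_neg hs, if_pos hf, if_pos hmem]
        simp only [pvScanDup, hsb, hfb]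
        by_cases hg : (pvGet log "wono", pvGet log "batch") = g
        · subst hg
          by_cases he : pvOrOpt (pvGet log "error_msg") (pvGet log "raw") = e
          · subst he
            simpa using hmem
          · simp [he, hinv (pvGet log "wono", pvGet log "batch") e]
        · simp [hinv g e]
          tauto
      · refine ⟨?_, by simp [pvAStep, if_neg hs, if_pos hf, hmem, hsb, hfb, hscan]⟩
        intro g e
        simp only [pvAStep, if_neg hs, if_pos hf, if_neg hmem]
        simp only [pvScanDup, hsb, hfb]
        rw [PySem.Dict.get?_insert]
        by_cases hg : (pvGet log "wono", pvGet log "batch") = g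
        · subst hg
          by_cases he : pvOrOpt (pvGet log "error_msg") (pvGet log "raw") = e
          · subst he
            simp
          · rw [if_neg (show ¬((pvGet log "wono", pvGet log "batch", e) =
                (pvGet log "wono", pvGet log "batch",
                  pvOrOpt (pvGet log "error_msg") (pvGet log "raw"))) from
                fun h => he ((congrArg (fun p => p.2.2) h).symm))]
            simp [he, hinv (pvGet log "wono", pvGet log "batch") e]
        · have hg' : ¬(g.1 = pvGet log "wono" ∧ g.2 = pvGet log "batch" ∧
              e = pvOrOpt (pvGet log "error_msg") (pvGet log "raw")) := by
            rintro ⟨h1, h2, -⟩; exact hg (Prod.ext h1.symm h2.symm)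
          have hgor : ¬pvGet log "wono" = g.1 ∨ ¬pvGet log "batch" = g.2 := by
            by_contra hc; push_neg at hc; exact hg (Prod.ext hc.1 hc.2)
          simp [Prod.ext_iff, hg', hinv g e]
          tauto
    · have hsb : pvIsSuccess log = false := by
        simp [pvIsSuccess]; tauto
      have hfb : pvIsFailed log = false := by
        simp [pvIsFailed]; tauto
      refine ⟨?_, by simp [pvAStep, if_neg hs, if_neg hf, hsb, hfb]⟩
      intro g e
      simp only [pvAStep, if_neg hs, if_neg hf]
      simp only [pvScanDup, hsb, hfb]
      by_cases hg : (pvGet log "wono", pvGet log "batch") = g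
      · subst hg
        simp [hinv (pvGet log "wono", pvGet log "batch") e]
      · simp [hinv g e]

theorem pv_main (rest : List (List (String × String))) :
    ∀ (res : List (List (String × String)))
      (seen : PySem.Dict (Option String × Option String × Option String) (Option String))
      (revpre : List (List (String × String))),
      pvInv seen revpre →
      (rest.foldl pvAStep (res, seen)).1 = res ++ pvDedupGo revpre rest := by
  induction rest with
  | nil => intro res seen revpre _; simp [pvDedupGo]
  | cons log rest ih =>
    intro res seen revpre hinv
    obtain ⟨hinv', hres⟩ := pvInv_step seen revpre log hinv (res := res)
    rw [List.foldl_cons]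
    rw [show pvAStep (res, seen) log =
      ((pvAStep (res, seen) log).1, (pvAStep (res, seen) log).2) by rfl]
    rw [ih _ _ _ hinv', hres]
    simp only [pvDedupGo]
    by_cases h1 : pvIsSuccess log || !pvIsFailed log
    · simp [h1]
    · simp only [h1, if_false, Bool.false_eq_true]
      by_cases h2 : pvScanDup (pvGet log "wono", pvGet log "batch")
          (pvOrOpt (pvGet log "error_msg") (pvGet log "raw")) revpre
      · simp [h2]
      · simp [h2]

-- ===== VERDICT (by name: the statement is the Claim_ definition above) =====
theorem deduplicate_error_logs_spec : Claim_equal_deduplicate_error_logs := by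
  intro logs _
  unfold Spec_deduplicate_error_logs deduplicate_error_logs deduplicate_error_logs_alt
  by_cases h : logs = []
  · subst h; simp [pvDedupGo]
  · rw [if_neg h]
    have := pv_main logs [] (PySem.Dict.mk []) []
      (by intro g e; simp [PySem.Dict.get?, pvScanDup])
    simpa using this
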